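-- pv_equiv track=rewrite | github.com/Kushal997-das/Hacktoberfest-2024 | Beginner Level 📁/Lexicographical Order/Lexicographical Username Change solution.py | possibleChanges
-- ===== SOURCE A (Python) =====
-- def possibleChanges(usernames):
--     result = []
--
--     # Iterate through each username
--     for username in usernames:
--         found = False
--
--         # Traverse through the username characters
--         for i in range(len(username)):
--             for j in range(i + 1, len(username)):
--                 # Check if there is a lexicographically smaller character later in the string
--                 if username[i] > username[j]:
--                     found = True
--                     break
--             if found:
--                 break
--
--         # Append "YES" if a valid swap was found, otherwise "NO"
--         if found:
--             result.append("YES")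
--         else:
--             result.append("NO")
--
--     return result
-- ===== SOURCE B (Python) =====
-- def possibleChanges(usernames):
--     # One pass per string: an inversion exists iff some adjacent pair decreases.
--     return ["YES" if any(a > b for a, b in zip(u, u[1:])) else "NO"
--             for u in usernames]
-- ===== Notes on version B (the rewrite author's own statement) =====
-- stated objective: simpler
-- what changed: Replaced the triple nested loop with break flags by a one-line comprehension checking each string's adjacent pairs, using the fact that an inversion exists iff some adjacent pair decreases.
import Mathlib
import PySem

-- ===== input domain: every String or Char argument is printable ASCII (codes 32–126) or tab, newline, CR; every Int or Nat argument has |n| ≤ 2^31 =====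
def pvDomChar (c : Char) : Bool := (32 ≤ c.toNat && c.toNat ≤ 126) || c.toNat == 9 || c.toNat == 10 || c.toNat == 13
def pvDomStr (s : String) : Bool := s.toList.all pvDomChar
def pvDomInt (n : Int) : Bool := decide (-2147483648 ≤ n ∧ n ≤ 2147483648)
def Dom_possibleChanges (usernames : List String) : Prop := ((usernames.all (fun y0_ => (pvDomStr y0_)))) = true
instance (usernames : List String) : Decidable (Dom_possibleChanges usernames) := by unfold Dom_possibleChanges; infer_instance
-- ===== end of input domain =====

-- ===== PORT A =====
-- B changes: one adjacent-pair pass per string instead of A's all-pairs scan (simpler; an inversion exists iff some adjacent pair decreases).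
-- aFound is A's nested inner loops over i and j with break: any pair i < j with username[i] > username[j]
def aFound (cs : List Char) : Bool :=
  (List.range cs.length).any (fun i =>
    (List.range' (i + 1) (cs.length - (i + 1))).any (fun j =>
      decide (cs.getD j ' ' < cs.getD i ' ')))

def possibleChanges (usernames : List String) : List String :=
  usernames.foldl (fun result username =>
    result ++ [if aFound username.toList then "YES" else "NO"]) []

-- ===== PORT B =====
def possibleChanges_alt (usernames : List String) : List String :=
  usernames.map (fun u =>
    if (u.toList.zip u.toList.tail).any (fun p => decide (p.2 < p.1)) then "YES" else "NO")

-- ===== PRECONDITION & SPEC =====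
def Spec_possibleChanges (usernames : List String) (out : List String) : Prop := out = possibleChanges_alt usernames
instance (usernames : List String) (out : List String) : Decidable (Spec_possibleChanges usernames out) := by unfold Spec_possibleChanges; infer_instance

-- ===== CLAIM (what is proved, stated in full; the proofs are below) =====
def Claim_equal_possibleChanges : Prop := ∀ (usernames : List String), Dom_possibleChanges usernames → Spec_possibleChanges usernames (possibleChanges usernames)

-- ===== LEMMAS AND PROOFS =====

-- per-string inversion boolean of B
def bFound (cs : List Char) : Bool :=
  (cs.zip cs.tail).any (fun p => decide (p.2 < p.1))

theorem bFound_false_iff (cs : List Char) : bFound cs = false ↔ List.IsChain (· ≤ ·) cs := by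
  induction cs with
  | nil => simp [bFound]
  | cons a t ih =>
    cases t with
    | nil => simp [bFound]
    | cons b t' =>
      simp only [bFound, List.zip, List.tail, List.zipWith, List.any_cons,
        List.isChain_cons_cons, Bool.or_eq_false_iff, decide_eq_false_iff_not, not_lt] at *
      exact and_congr Iff.rfl ih

theorem aFound_false_iff (cs : List Char) : aFound cs = false ↔ List.Pairwise (· ≤ ·) cs := by
  rw [List.pairwise_iff_getElem]
  rw [← Bool.not_eq_true]
  simp only [aFound, List.any_eq_true, List.mem_range, List.mem_range', not_exists, not_and,
    decide_eq_true_eq]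
  constructor
  · intro h i j hi hj hij
    by_contra hc
    have hd : cs.getD j ' ' < cs.getD i ' ' := by
      rw [List.getD_eq_getElem _ _ hj, List.getD_eq_getElem _ _ hi]
      exact lt_of_not_ge hc
    exact h i hi j ⟨j - (i + 1), by omega, by omega⟩ hd
  · intro h i hi j hj hd
    obtain ⟨d, hdlt, rfl⟩ := hj
    have hj' : i + 1 + 1 * d < cs.length := by omega
    rw [List.getD_eq_getElem _ _ hj', List.getD_eq_getElem _ _ hi] at hd
    exact absurd (h i _ hi hj' (by omega)) (not_le_of_gt hd)

theorem found_eq (cs : List Char) : aFound cs = bFound cs := by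
  have hp := aFound_false_iff cs
  have hq := bFound_false_iff cs
  rw [List.isChain_iff_pairwise] at hq
  rcases Bool.eq_false_or_eq_true (bFound cs) with hb | hb <;>
    rcases Bool.eq_false_or_eq_true (aFound cs) with ha | ha <;>
    rw [ha, hb] <;> rw [ha] at hp <;> rw [hb] at hq <;> simp_all

theorem foldl_app (l : List String) (acc : List String) :
    l.foldl (fun result username =>
      result ++ [if aFound username.toList then "YES" else "NO"]) acc
    = acc ++ l.map (fun u => if aFound u.toList then "YES" else "NO") := by
  induction l generalizing acc with
  | nil => simp
  | cons h t ih => simp [List.foldl_cons, ih]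

theorem possibleChanges_spec : Claim_equal_possibleChanges := by
  intro usernames _
  unfold Spec_possibleChanges possibleChanges possibleChanges_alt
  rw [foldl_app]
  simp only [List.nil_append]
  exact List.map_congr_left fun u _ => by rw [found_eq u.toList]; rfl
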